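-- pv_equiv track=rewrite | github.com/k30035600/lotto023 | utils/prune_lotto023_pending_perfect_top-초록마을.py | calculate_consecutive_stats
-- ===== SOURCE A (Python) =====
-- def calculate_consecutive_stats(rounds: list[dict]) -> dict[int, int]:
--     m = {i: 0 for i in range(1, 46)}
--     for r in rounds:
--         nums = sorted(r["numbers"])
--         for j in range(len(nums) - 1):
--             if nums[j + 1] == nums[j] + 1:
--                 m[nums[j]] = m.get(nums[j], 0) + 1
--                 m[nums[j + 1]] = m.get(nums[j + 1], 0) + 1
--     return m
-- ===== SOURCE B (Python) =====
-- def _runs(vals):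
--     # split a list into maximal runs of consecutive values (vals is sorted & distinct here)
--     runs = []
--     cur = []
--     for v in vals:
--         if cur and v == cur[-1] + 1:
--             cur.append(v)
--         else:
--             if cur:
--                 runs.append(cur)
--             cur = [v]
--     if cur:
--         runs.append(cur)
--     return runs
--
--
-- def calculate_consecutive_stats(rounds: list[dict]) -> dict[int, int]:
--     m = {i: 0 for i in range(1, 46)}
--     for r in rounds:
--         for run in _runs(sorted(set(r["numbers"]))):
--             if len(run) >= 2:
--                 m[run[0]] = m.get(run[0], 0) + 1
--                 for v in run[1:-1]:
--                     m[v] = m.get(v, 0) + 2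
--                 m[run[-1]] = m.get(run[-1], 0) + 1
--     return m
-- ===== Notes on version B (the rewrite author's own statement) =====
-- stated objective: alternative
-- what changed: Instead of scanning adjacent positions of the sorted list and incrementing both members of each consecutive pair, B partitions the distinct sorted values of each round into maximal runs of consecutive integers and credits each run in one shot: +1 to each endpoint and +2 to each interior value.
import Mathlib
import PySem

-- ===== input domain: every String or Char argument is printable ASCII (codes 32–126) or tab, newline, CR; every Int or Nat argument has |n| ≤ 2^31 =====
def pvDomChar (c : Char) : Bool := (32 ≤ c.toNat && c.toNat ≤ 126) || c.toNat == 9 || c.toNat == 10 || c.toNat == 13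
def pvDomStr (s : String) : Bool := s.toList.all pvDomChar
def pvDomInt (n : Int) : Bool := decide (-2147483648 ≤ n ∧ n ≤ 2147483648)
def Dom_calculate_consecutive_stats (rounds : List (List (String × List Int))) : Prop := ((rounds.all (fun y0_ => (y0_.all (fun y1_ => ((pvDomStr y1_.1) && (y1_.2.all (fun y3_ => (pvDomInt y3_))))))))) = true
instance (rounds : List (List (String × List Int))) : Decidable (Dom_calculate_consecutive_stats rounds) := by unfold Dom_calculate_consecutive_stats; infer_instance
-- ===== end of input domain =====

-- B replaces A's adjacent-pair scan of the sorted list by a decomposition of each round's distinct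
-- values into maximal consecutive runs, crediting +1 to run endpoints and +2 to interiors
-- (alternative algorithm, same return value; no speed claim).


-- ===== PORT A =====
def calculate_consecutive_stats (rounds : List (List (String × List Int))) : List (Int × Int) :=
  (rounds.foldl (fun m r =>
      let nums := PySem.List.sorted (((PySem.Dict.mk r).get? "numbers").getD []) (fun x => x) false
      (PySem.List.pyRange 0 ((nums.length : Int) - 1) 1).foldl (fun m j =>
        if PySem.List.pyGetD nums (j + 1) 0 = PySem.List.pyGetD nums j 0 + 1 then
          let m1 := m.insert (PySem.List.pyGetD nums j 0) (m.getD (PySem.List.pyGetD nums j 0) 0 + 1)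
          m1.insert (PySem.List.pyGetD nums (j + 1) 0) (m1.getD (PySem.List.pyGetD nums (j + 1) 0) 0 + 1)
        else m) m)
    ((PySem.List.pyRange 1 46 1).foldl (fun m i => m.insert i 0) PySem.Dict.empty)).items

-- ===== PORT B =====
-- helper _runs: split a list into maximal runs of consecutive values (loop with 'runs'/'cur' state)
def pvRunsLoopStep (s : List (List Int) × List Int) (v : Int) : List (List Int) × List Int :=
  match s.2.getLast? with                                  -- 'if cur and v == cur[-1] + 1'
  | some l => if v = l + 1 then (s.1, s.2 ++ [v]) else (s.1 ++ [s.2], [v])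
  | none => (s.1, [v])

def pvRunsLoop (vals : List Int) : List (List Int) :=
  let s := vals.foldl pvRunsLoopStep ([], [])
  if s.2 = [] then s.1 else s.1 ++ [s.2]                   -- trailing 'if cur: runs.append(cur)'

-- the body of B's inner loop: credit one maximal run (endpoints +1, interiors +2)
def pvFlushRun (m : PySem.Dict Int Int) (run : List Int) : PySem.Dict Int Int :=
  if 2 ≤ run.length then
    let m1 := m.insert (PySem.List.pyGetD run 0 0) (m.getD (PySem.List.pyGetD run 0 0) 0 + 1)
    let m2 := (PySem.List.slice run (some 1) (some (-1))).foldl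
        (fun m v => m.insert v (m.getD v 0 + 2)) m1
    m2.insert (PySem.List.pyGetD run (-1) 0) (m2.getD (PySem.List.pyGetD run (-1) 0) 0 + 1)
  else m

def calculate_consecutive_stats_alt (rounds : List (List (String × List Int))) : List (Int × Int) :=
  (rounds.foldl (fun m r =>
      (pvRunsLoop (PySem.List.sorted (PySem.Set.ofList (((PySem.Dict.mk r).get? "numbers").getD []))
          (fun x => x) false)).foldl pvFlushRun m)
    ((PySem.List.pyRange 1 46 1).foldl (fun m i => m.insert i 0) PySem.Dict.empty)).items

-- ===== PRECONDITION & SPEC =====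
-- Pre_ excludes exactly the rounds lacking a "numbers" key, on which Python A raises KeyError.
def Pre_calculate_consecutive_stats (rounds : List (List (String × List Int))) : Prop :=
  ∀ r ∈ rounds, "numbers" ∈ r.map Prod.fst
instance (rounds : List (List (String × List Int))) : Decidable (Pre_calculate_consecutive_stats rounds) := by unfold Pre_calculate_consecutive_stats; infer_instance
def pvWitness_calculate_consecutive_stats : (List (List (String × List Int))) := [[("numbers", [3, 4, 10])]]
def Spec_calculate_consecutive_stats (rounds : List (List (String × List Int))) (out : List (Int × Int)) : Prop := out = calculate_consecutive_stats_alt rounds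
instance (rounds : List (List (String × List Int))) (out : List (Int × Int)) : Decidable (Spec_calculate_consecutive_stats rounds out) := by unfold Spec_calculate_consecutive_stats; infer_instance

-- ===== CLAIM (what is proved, stated in full; the proofs are below) =====
def Claim_equal_calculate_consecutive_stats : Prop := ∀ (rounds : List (List (String × List Int))), Dom_calculate_consecutive_stats rounds → Pre_calculate_consecutive_stats rounds → Spec_calculate_consecutive_stats rounds (calculate_consecutive_stats rounds)

-- ===== LEMMAS AND PROOFS =====

-- increment a dict entry (proof-side abbreviation; pvStep m a b = pvAdd (pvAdd m a 1) b 1)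
def pvAdd (m : PySem.Dict Int Int) (k c : Int) : PySem.Dict Int Int := m.insert k (m.getD k 0 + c)

def pvStep (m : PySem.Dict Int Int) (a b : Int) : PySem.Dict Int Int :=
  (m.insert a (m.getD a 0 + 1)).insert b ((m.insert a (m.getD a 0 + 1)).getD b 0 + 1)

theorem pvAdd_merge (m : PySem.Dict Int Int) (k : Int) :
    pvAdd (pvAdd m k 1) k 1 = pvAdd m k 2 := by
  unfold pvAdd
  rw [PySem.Dict.getD_insert_self, PySem.Dict.insert_insert_self]
  ring_nf

-- collapse adjacent duplicates
def pvCollapse : List Int → List Int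
  | [] => []
  | [a] => [a]
  | a :: b :: t => if a = b then pvCollapse (b :: t) else a :: pvCollapse (b :: t)

theorem pvCollapse_cons (b : Int) (t : List Int) : ∃ u, pvCollapse (b :: t) = b :: u := by
  induction t with
  | nil => exact ⟨[], rfl⟩
  | cons c t' ih =>
    by_cases h : b = c
    · subst h
      obtain ⟨u, hu⟩ := ih
      exact ⟨u, by simp [pvCollapse, hu]⟩
    · exact ⟨pvCollapse (c :: t'), by simp [pvCollapse, h]⟩

theorem mem_pvCollapse (x : Int) (l : List Int) : x ∈ pvCollapse l ↔ x ∈ l := by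
  induction l with
  | nil => simp [pvCollapse]
  | cons a t ih =>
    cases t with
    | nil => simp [pvCollapse]
    | cons b t' =>
      by_cases h : a = b
      · subst h; simp [pvCollapse, ih]
      · simp [pvCollapse, h, ih]

theorem pvCollapse_pairwise_lt (l : List Int) (h : l.Pairwise (· ≤ ·)) :
    (pvCollapse l).Pairwise (· < ·) := by
  induction l with
  | nil => simp [pvCollapse]
  | cons a t ih =>
    cases t with
    | nil => simp [pvCollapse]
    | cons b t' =>
      have ht : (b :: t').Pairwise (· ≤ ·) := h.tail
      by_cases hab : a = b
      · subst hab; simpa [pvCollapse] using ih ht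
      · have hale : ∀ y ∈ b :: t', a ≤ y := by
          intro y hy; exact List.rel_of_pairwise_cons h hy
        have halt : a < b := lt_of_le_of_ne (hale b (by simp)) hab
        have hble : ∀ y ∈ t', b ≤ y := fun y hy => List.rel_of_pairwise_cons ht hy
        simp only [pvCollapse, if_neg hab]
        refine List.pairwise_cons.mpr ⟨?_, ih ht⟩
        intro y hy
        have hyb : y ∈ b :: t' := (mem_pvCollapse y (b :: t')).mp hy
        rcases List.mem_cons.mp hyb with rfl | hyt
        · exact halt
        · exact lt_of_lt_of_le halt (hble y hyt)

-- dropping equal adjacent pairs from the zip-with-tail IS the zip-with-tail of the collapsed list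
theorem pvZipTail_filter_ne (l : List Int) :
    (l.zip l.tail).filter (fun p => decide (p.1 ≠ p.2)) =
      (pvCollapse l).zip (pvCollapse l).tail := by
  induction l with
  | nil => simp [pvCollapse]
  | cons a t ih =>
    cases t with
    | nil => simp [pvCollapse]
    | cons b t' =>
      by_cases h : a = b
      · subst h
        simpa [pvCollapse, List.filter_cons] using ih
      · obtain ⟨u, hu⟩ := pvCollapse_cons b t'
        simp [pvCollapse, h, hu] at ih ⊢
        simp [ih]

theorem pvMapRange (nums : List Int) :
    (List.range (nums.length - 1)).map
        (fun i => ((nums.getD i 0 : Int), nums.getD (i + 1) 0)) = nums.zip nums.tail := by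
  apply List.ext_getElem
  · simp [List.length_zip]
  · intro i h1 h2
    have hi : i < nums.length - 1 := by simpa using h1
    simp [List.getElem_zip, List.getElem_tail]
    constructor
    · exact List.getD_eq_getElem _ _ (by omega)
    · exact List.getD_eq_getElem _ _ (by omega)

-- indexed adjacent scan = fold over zip-with-tail
theorem pvIdxFold (nums : List Int) (m : PySem.Dict Int Int) :
    (PySem.List.pyRange 0 ((nums.length : Int) - 1) 1).foldl (fun m j =>
        if PySem.List.pyGetD nums (j + 1) 0 = PySem.List.pyGetD nums j 0 + 1 then
          pvStep m (PySem.List.pyGetD nums j 0) (PySem.List.pyGetD nums (j + 1) 0)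
        else m) m =
      (nums.zip nums.tail).foldl (fun m p =>
        if p.2 = p.1 + 1 then pvStep m p.1 p.2 else m) m := by
  rw [PySem.List.pyRange_one, List.foldl_map]
  have htn : (((nums.length : Int) - 1) - 0).toNat = nums.length - 1 := by omega
  rw [htn, ← pvMapRange nums, List.foldl_map]
  apply PySem.List.foldl_congr_mem
  intro acc i _
  have h2 : ((i : Int) + 1) = (((i + 1 : Nat)) : Int) := by push_cast; ring
  simp only [zero_add]
  rw [h2]
  simp only [PySem.List.pyGetD_natCast, List.getD]

-- the consecutive-pair filter sees only the collapsed list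
theorem pvFilter_consec (l : List Int) :
    (l.zip l.tail).filter (fun p => decide (p.2 = p.1 + 1)) =
      ((pvCollapse l).zip (pvCollapse l).tail).filter (fun p => decide (p.2 = p.1 + 1)) := by
  rw [← pvZipTail_filter_ne l, List.filter_filter]
  apply List.filter_congr
  intro p _
  by_cases hp : p.2 = p.1 + 1
  · have hne : p.1 ≠ p.2 := by omega
    simp [hp]
  · simp [hp]

theorem pvCollapse_sorted (xs : List Int) :
    pvCollapse (PySem.List.sorted xs (fun x => x) false) =
      PySem.List.sorted (PySem.Set.ofList xs) (fun x => x) false := by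
  symm
  apply PySem.List.sorted_eq_of_perm_of_pairwise_lt
  · have h1 : (pvCollapse (PySem.List.sorted xs (fun x => x) false)).Nodup :=
      (pvCollapse_pairwise_lt _ (by simpa using PySem.List.sorted_pairwise xs (fun x => x))).imp
        (fun h => ne_of_lt h)
    have h2 : (PySem.Set.ofList xs : List Int).Nodup := PySem.Set.nodup_ofList xs
    rw [List.perm_ext_iff_of_nodup h1 h2]
    intro y
    rw [mem_pvCollapse, PySem.List.mem_sorted, PySem.Set.mem_ofList]
  · simpa using pvCollapse_pairwise_lt _ (by simpa using PySem.List.sorted_pairwise xs (fun x => x))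

-- ---------- B-side: the runs loop computes the recursive run decomposition ----------

theorem pvGetLast?_cons (c : Int) (cs : List Int) : (c :: cs).getLast? = some (cs.getLastD c) := by
  induction cs generalizing c with
  | nil => rfl
  | cons b cs' ih => rw [List.getLast?_cons_cons, ih b, List.getLastD_cons]

def pvRunsR : List Int → List (List Int)
  | [] => []
  | [a] => [[a]]
  | a :: b :: t =>
    if b = a + 1 then (a :: (pvRunsR (b :: t)).headI) :: (pvRunsR (b :: t)).tail
    else [a] :: pvRunsR (b :: t)

theorem pvRunsR_shape (b : Int) (t : List Int) :
    ∃ h tl, pvRunsR (b :: t) = (b :: h) :: tl := by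
  cases t with
  | nil => exact ⟨[], [], rfl⟩
  | cons c t' =>
    by_cases hc : c = b + 1
    · exact ⟨(pvRunsR (c :: t')).headI, (pvRunsR (c :: t')).tail, by simp [pvRunsR, hc]⟩
    · exact ⟨[], pvRunsR (c :: t'), by simp [pvRunsR, hc]⟩

def pvPost (s : List (List Int) × List Int) : List (List Int) :=
  if s.2 = [] then s.1 else s.1 ++ [s.2]

def pvGlue (cur : List Int) : List (List Int) → List (List Int)
  | [] => [cur]
  | r :: rs => if r.headI = cur.getLastD 0 + 1 then (cur ++ r) :: rs else cur :: r :: rs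

theorem pvRunsLoopStep_cons (rs : List (List Int)) (c : Int) (cs : List Int) (v : Int) :
    pvRunsLoopStep (rs, c :: cs) v =
      if v = cs.getLastD c + 1 then (rs, (c :: cs) ++ [v]) else (rs ++ [c :: cs], [v]) := by
  simp only [pvRunsLoopStep, pvGetLast?_cons]

-- accumulated completed runs just prefix the result
theorem pvRunsAcc (vals : List Int) : ∀ (runs : List (List Int)) (cur : List Int),
    pvPost (vals.foldl pvRunsLoopStep (runs, cur)) =
      runs ++ pvPost (vals.foldl pvRunsLoopStep ([], cur)) := by
  induction vals with
  | nil =>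
    intro runs cur
    by_cases h : cur = [] <;> simp [pvPost, h]
  | cons v t ih =>
    intro runs cur
    cases cur with
    | nil =>
      rw [List.foldl_cons, List.foldl_cons]
      exact ih runs [v]
    | cons c cs =>
      rw [List.foldl_cons, List.foldl_cons, pvRunsLoopStep_cons, pvRunsLoopStep_cons]
      by_cases hv : v = cs.getLastD c + 1
      · rw [if_pos hv, if_pos hv]
        exact ih runs ((c :: cs) ++ [v])
      · rw [if_neg hv, if_neg hv, ih (runs ++ [c :: cs]) [v], ih ([] ++ [c :: cs]) [v]]
        simp

theorem pvGlue_single (v : Int) (t : List Int) :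
    pvGlue [v] (pvRunsR t) = pvRunsR (v :: t) := by
  cases t with
  | nil => rfl
  | cons b t' =>
    obtain ⟨h, tl, hsh⟩ := pvRunsR_shape b t'
    by_cases hb : b = v + 1
    · subst hb
      simp [pvGlue, pvRunsR, hsh]
    · simp [pvGlue, pvRunsR, hsh, hb]

theorem pvRunsGlue (vals : List Int) : ∀ (cur : List Int), cur ≠ [] →
    pvPost (vals.foldl pvRunsLoopStep ([], cur)) = pvGlue cur (pvRunsR vals) := by
  induction vals with
  | nil =>
    intro cur h
    simp [pvPost, h, pvGlue, pvRunsR]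
  | cons v t ih =>
    intro cur hcur
    cases cur with
    | nil => exact absurd rfl hcur
    | cons c cs =>
      rw [List.foldl_cons, pvRunsLoopStep_cons]
      by_cases hv : v = cs.getLastD c + 1
      · rw [if_pos hv, ih ((c :: cs) ++ [v]) (by simp)]
        cases t with
        | nil =>
          simp [pvRunsR, pvGlue, pvGetLast?_cons, List.getLastD_eq_getLast?, hv]
        | cons b t' =>
          obtain ⟨h, tl, hsh⟩ := pvRunsR_shape b t'
          by_cases hb : b = v + 1
          · subst hb
            have h2 : pvRunsR (v :: (v + 1) :: t') = (v :: (v + 1) :: h) :: tl := by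
              simp [pvRunsR, hsh]
            rw [hsh, h2]
            simp [pvGlue, pvGetLast?_cons, List.getLastD_concat, List.getLastD_eq_getLast?, hv]
          · have h2 : pvRunsR (v :: b :: t') = [v] :: pvRunsR (b :: t') := by
              simp [pvRunsR, hb]
            rw [h2, hsh]
            simp only [List.getLastD_eq_getLast?] at hv
            simp [pvGlue, pvGetLast?_cons, List.getLastD_concat, List.getLastD_eq_getLast?, hv, hb]
            omega
      · rw [if_neg hv]
        simp only [List.nil_append]
        rw [pvRunsAcc t [c :: cs] [v], ih [v] (by simp), pvGlue_single]
        obtain ⟨h, tl, hsh⟩ := pvRunsR_shape v t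
        rw [hsh]
        simp only [List.getLastD_eq_getLast?] at hv
        simp [pvGlue, pvGetLast?_cons, List.getLastD_eq_getLast?, hv]

theorem pvRunsLoop_eq (vals : List Int) : pvRunsLoop vals = pvRunsR vals := by
  cases vals with
  | nil => rfl
  | cons v t =>
    show pvPost ((v :: t).foldl pvRunsLoopStep ([], [])) = _
    rw [List.foldl_cons]
    show pvPost (t.foldl pvRunsLoopStep ([], [v])) = _
    rw [pvRunsGlue t [v] (by simp), pvGlue_single]

-- ---------- flushing a run = the pair-by-pair steps of A on that run ----------

theorem pvSlice_one_neg_one (xs : List Int) :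
    PySem.List.slice xs (some 1) (some (-1)) = xs.tail.dropLast := by
  simp only [PySem.List.slice, Int.reduceNeg, Order.lt_one_iff, PySem.List.clampIdx_neg_ofNat,
    zero_le_one, PySem.List.clampIdx_of_nonneg, Int.toNat_one]
  cases xs with
  | nil => simp
  | cons a l => simp [List.dropLast_eq_take, List.length_cons]

theorem pvGetD_zero (a : Int) (l : List Int) : PySem.List.pyGetD (a :: l) 0 0 = a := by
  simp [PySem.List.pyGetD]

theorem pvGetD_neg_one (a : Int) (l : List Int) :
    PySem.List.pyGetD (a :: l) (-1) 0 = l.getLastD a := by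
  have h : ∀ (x : Int) (t : List Int), (x :: t)[t.length]'(by simp) = t.getLastD x := by
    intro x t
    induction t generalizing x with
    | nil => rfl
    | cons b l' ih =>
      show (x :: b :: l')[l'.length + 1] = (b :: l').getLastD x
      rw [List.getElem_cons_succ, List.getLastD_cons]
      exact ih b
  simp [PySem.List.pyGetD, PySem.List.pyIdx?, PySem.List.pyGet?, h a l, List.getLastD_eq_getLast?]

theorem pvFlushRun_cons (m : PySem.Dict Int Int) (a : Int) (h : List Int) :
    pvFlushRun (pvStep m a (a + 1)) ((a + 1) :: h) = pvFlushRun m (a :: (a + 1) :: h) := by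
  have hst : ∀ (d : PySem.Dict Int Int),
      (pvStep d a (a + 1)).insert (a + 1) ((pvStep d a (a + 1)).getD (a + 1) 0 + 1) =
        (d.insert a (d.getD a 0 + 1)).insert (a + 1)
          ((d.insert a (d.getD a 0 + 1)).getD (a + 1) 0 + 2) := by
    intro d
    show pvAdd (pvAdd (pvAdd d a 1) (a + 1) 1) (a + 1) 1 = pvAdd (pvAdd d a 1) (a + 1) 2
    rw [pvAdd_merge]
  cases h with
  | nil =>
    simp only [pvFlushRun, pvSlice_one_neg_one, pvGetD_zero, pvGetD_neg_one, List.length_cons,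
      List.length_nil, List.tail_cons, List.foldl_nil, List.getLastD_cons, List.getLastD_nil]
    rw [if_neg (by omega), if_pos (by omega)]
    simp [pvStep]
  | cons c h' =>
    have hL : PySem.List.slice (a :: (a + 1) :: c :: h') (some 1) (some (-1)) =
        (a + 1) :: (c :: h').dropLast := by
      rw [pvSlice_one_neg_one]
      simp
    have hR : PySem.List.slice ((a + 1) :: c :: h') (some 1) (some (-1)) =
        (c :: h').dropLast := by
      rw [pvSlice_one_neg_one]
      simp
    simp only [pvFlushRun, List.length_cons, hL, hR, pvGetD_zero, pvGetD_neg_one,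
      List.getLastD_cons]
    rw [if_pos (by omega), if_pos (by omega)]
    rw [List.foldl_cons, hst]

-- MAIN: the filtered adjacent-pair fold equals the run-by-run flush, for ANY list
theorem pvMain (D : List Int) : ∀ (m : PySem.Dict Int Int),
    ((D.zip D.tail).filter (fun p => decide (p.2 = p.1 + 1))).foldl
        (fun m p => pvStep m p.1 p.2) m =
      (pvRunsR D).foldl pvFlushRun m := by
  induction D with
  | nil => intro m; rfl
  | cons a T ih =>
    intro m
    cases T with
    | nil => simp [pvRunsR, pvFlushRun]
    | cons b T' =>
      have ih' := ih
      simp only [List.tail_cons] at ih'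
      by_cases hb : b = a + 1
      · subst hb
        obtain ⟨h, tl, hsh⟩ := pvRunsR_shape (a + 1) T'
        have hstep : pvRunsR (a :: (a + 1) :: T') = (a :: (a + 1) :: h) :: tl := by
          simp [pvRunsR, hsh]
        rw [hstep]
        rw [show ((a :: (a + 1) :: T').zip ((a :: (a + 1) :: T').tail)) =
            (a, a + 1) :: ((a + 1) :: T').zip T' by simp]
        rw [List.filter_cons_of_pos (by simp)]
        simp only [List.foldl_cons]
        rw [ih' (pvStep m a (a + 1)), hsh]
        simp only [List.foldl_cons]
        rw [pvFlushRun_cons]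
      · have h2 : pvRunsR (a :: b :: T') = [a] :: pvRunsR (b :: T') := by
          simp [pvRunsR, hb]
        rw [h2]
        rw [show ((a :: b :: T').zip ((a :: b :: T').tail)) = (a, b) :: (b :: T').zip T' by simp]
        rw [List.filter_cons_of_neg (by simp [hb])]
        simp only [List.foldl_cons]
        rw [show pvFlushRun m [a] = m by simp [pvFlushRun]]
        exact ih' m

-- the whole per-round body of A equals the per-round body of B
theorem pvRound_eq (m : PySem.Dict Int Int) (xs : List Int) :
    (PySem.List.pyRange 0 (((PySem.List.sorted xs (fun x => x) false).length : Int) - 1) 1).foldl (fun m j =>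
        if PySem.List.pyGetD (PySem.List.sorted xs (fun x => x) false) (j + 1) 0 =
            PySem.List.pyGetD (PySem.List.sorted xs (fun x => x) false) j 0 + 1 then
          pvStep m (PySem.List.pyGetD (PySem.List.sorted xs (fun x => x) false) j 0)
            (PySem.List.pyGetD (PySem.List.sorted xs (fun x => x) false) (j + 1) 0)
        else m) m =
      (pvRunsLoop (PySem.List.sorted (PySem.Set.ofList xs) (fun x => x) false)).foldl pvFlushRun m := by
  rw [pvIdxFold]
  rw [PySem.List.foldl_ite_eq_foldl_filter (p := fun p : Int × Int => p.2 = p.1 + 1)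
    (f := fun m p => pvStep m p.1 p.2)]
  rw [pvFilter_consec, pvCollapse_sorted]
  rw [pvMain, pvRunsLoop_eq]

-- ===== VERDICT (by name: the statement is the Claim_ definition above) =====
theorem calculate_consecutive_stats_spec : Claim_equal_calculate_consecutive_stats := by
  intro rounds _ _
  show calculate_consecutive_stats rounds = calculate_consecutive_stats_alt rounds
  unfold calculate_consecutive_stats calculate_consecutive_stats_alt
  congr 1
  apply PySem.List.foldl_congr_mem
  intro m r _
  simpa [pvStep] using pvRound_eq m (((PySem.Dict.mk r).get? "numbers").getD [])
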